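-- pv_equiv track=rewrite | github.com/nick007007/pyoi | string.py | min_fix
-- ===== SOURCE A (Python) =====
-- def max_fix(s):
--     n = len(s)
--     max_same = [0] * n              # max same fix of s[: i + 1]
--
--     for i in range(1, n):
--         j = i - 1
--
--         while j >= 0:
--             m = max_same[j]
--
--             if s[i] == s[m]:
--                 max_same[i] = m + 1
--                 break
--
--             j = m - 1
--
--     return max_same
--
-- def min_fix(s):
--     min_same = max_fix(s)
--
--     for i in range(1, len(s)):
--         j = i                       # initial j as i > 0
--
--         while m := min_same[j]:     # ensure j and min same fix > 0
--             min_same[i] = m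
--             j = m - 1               # worst j is 0
--
--     return min_same
-- ===== SOURCE B (Python) =====
-- def max_fix(s):
--     n = len(s)
--     max_same = [0] * n
--
--     for i in range(1, n):
--         j = i - 1
--
--         while j >= 0:
--             m = max_same[j]
--
--             if s[i] == s[m]:
--                 max_same[i] = m + 1
--                 break
--
--             j = m - 1
--
--     return max_same
--
-- def min_fix(s):
--     m = max_fix(s)
--     n = len(s)
--     res = [0] * n
--     for i in range(1, n):
--         p = m[i]
--         if p:
--             r = res[p - 1]
--             res[i] = r if r else p
--     return res
-- ===== Notes on version B (the rewrite author's own statement) =====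
-- stated objective: simpler
-- what changed: B keeps the max_fix border array but replaces A's in-place chain-walking while-loop (which repeatedly overwrites min_same[i] while following border links) with a fresh result array and a single flat recurrence res[i] = res[p-1] if res[p-1] else p over already-computed answers.
import Mathlib
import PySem

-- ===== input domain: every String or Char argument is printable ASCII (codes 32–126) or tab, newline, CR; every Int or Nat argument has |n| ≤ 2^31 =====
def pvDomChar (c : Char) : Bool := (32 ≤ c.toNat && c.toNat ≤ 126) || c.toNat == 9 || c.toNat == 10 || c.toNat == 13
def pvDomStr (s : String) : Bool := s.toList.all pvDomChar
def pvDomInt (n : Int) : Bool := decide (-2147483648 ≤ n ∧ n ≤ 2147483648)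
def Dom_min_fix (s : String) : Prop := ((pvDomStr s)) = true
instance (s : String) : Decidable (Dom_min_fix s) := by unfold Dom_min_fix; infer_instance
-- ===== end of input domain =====

-- B keeps A's helper max_fix but replaces A's inner chain-walking while-loop by a single
-- flat recurrence on the already-computed answers; objective: simpler. Return value only
-- (A mutates the helper's list in place, B builds a fresh one; callers see only the return).

-- ===== PORT A =====
-- inner `while j >= 0` loop of max_fix; fuel only guards totality (j strictly decreases)
def maxFixGo (s : List Char) (i : Nat) : Nat → List Int → Int → List Int
  | 0, arr, _ => arr
  | fuel + 1, arr, j =>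
    if j < 0 then arr
    else
      let m := arr.getD j.toNat 0
      if s.getD i ' ' = s.getD m.toNat ' ' then arr.set i (m + 1)
      else maxFixGo s i fuel arr (m - 1)

def maxFix (s : List Char) : List Int :=
  let n := s.length
  (List.range' 1 (n - 1)).foldl (fun arr i => maxFixGo s i (i + 1) arr ((i : Int) - 1))
    (List.replicate n (0 : Int))

-- inner `while m := min_same[j]` loop; fuel only guards totality
def minFixGo : Nat → List Int → Nat → Int → List Int
  | 0, arr, _, _ => arr
  | fuel + 1, arr, i, j =>
    let m := arr.getD j.toNat 0
    if m ≠ 0 then minFixGo fuel (arr.set i m) i (m - 1)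
    else arr

def min_fix (s : String) : List Int :=
  let l := s.toList
  let ms := maxFix l
  (List.range' 1 (l.length - 1)).foldl (fun arr i => minFixGo (i + 2) arr i (i : Int)) ms

-- ===== PORT B =====
def min_fix_alt (s : String) : List Int :=
  let l := s.toList
  let m := maxFix l
  (List.range' 1 (l.length - 1)).foldl
    (fun res i =>
      let p := m.getD i 0
      if p ≠ 0 then
        let r := res.getD (p - 1).toNat 0
        res.set i (if r ≠ 0 then r else p)
      else res)
    (List.replicate l.length (0 : Int))

-- ===== PRECONDITION & SPEC =====
def Spec_min_fix (s : String) (out : List Int) : Prop := out = min_fix_alt s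
instance (s : String) (out : List Int) : Decidable (Spec_min_fix s out) := by unfold Spec_min_fix; infer_instance

-- ===== CLAIM (what is proved, stated in full; the proofs are below) =====
def Claim_equal_min_fix : Prop := ∀ (s : String), Dom_min_fix s → Spec_min_fix s (min_fix s)

-- ===== LEMMAS AND PROOFS =====

theorem getD_set_self (l : List Int) (i : Nat) (v : Int) (h : i < l.length) :
    (l.set i v).getD i 0 = v := by
  simp [List.getD_eq_getElem?_getD, h]

theorem getD_set_ne (l : List Int) (i k : Nat) (v : Int) (h : i ≠ k) :
    (l.set i v).getD k 0 = l.getD k 0 := by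
  simp [List.getD_eq_getElem?_getD, List.getElem?_set_ne h]

theorem getD_replicate (n k : Nat) : (List.replicate n (0 : Int)).getD k 0 = 0 := by
  rcases lt_or_ge k n with h | h
  · simp [List.getD_eq_getElem?_getD, h]
  · simp [List.getD_eq_getElem?_getD,
      List.getElem?_eq_none (by simpa using h : (List.replicate n (0 : Int)).length ≤ k)]

-- bounds invariant for the border arrays: 0 ≤ arr[k] ≤ k
def BoundsInv (arr : List Int) : Prop := ∀ k : Nat, 0 ≤ arr.getD k 0 ∧ arr.getD k 0 ≤ (k : Int)

theorem boundsInv_replicate (n : Nat) : BoundsInv (List.replicate n (0 : Int)) := by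
  intro k
  rw [getD_replicate]
  exact ⟨le_refl 0, Int.natCast_nonneg k⟩

theorem maxFixGo_len (s : List Char) (i : Nat) :
    ∀ fuel arr j, (maxFixGo s i fuel arr j).length = arr.length := by
  intro fuel
  induction fuel with
  | zero => intro arr j; rfl
  | succ f ih =>
    intro arr j
    simp only [maxFixGo]
    split
    · rfl
    · split
      · simp
      · exact ih _ _

theorem maxFixGo_bounds (s : List Char) (i : Nat) :
    ∀ fuel arr (j : Int), BoundsInv arr → j < (i : Int) →
      BoundsInv (maxFixGo s i fuel arr j) := by
  intro fuel
  induction fuel with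
  | zero => intro arr j hB _; exact hB
  | succ f ih =>
    intro arr j hB hj
    simp only [maxFixGo]
    split
    · exact hB
    · rename_i hj0
      have hj0' : 0 ≤ j := by omega
      set m := arr.getD j.toNat 0 with hm
      have hmle : m ≤ (j.toNat : Int) := (hB j.toNat).2
      have hjlt : (j.toNat : Int) < (i : Int) := by omega
      split
      · intro k
        rcases eq_or_ne i k with rfl | hne
        · rcases lt_or_ge i arr.length with h | h
          · rw [getD_set_self _ _ _ h]
            exact ⟨by have := (hB j.toNat).1; omega, by omega⟩
          · have h0 : (arr.set i (m + 1)).getD i 0 = 0 := by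
              rw [List.getD_eq_getElem?_getD,
                List.getElem?_eq_none (by simpa using h)]
              rfl
            rw [h0]
            exact ⟨le_refl 0, Int.natCast_nonneg i⟩
        · rw [getD_set_ne _ _ _ _ hne]; exact hB k
      · exact ih _ _ hB (by omega)

theorem maxFix_fold_bounds (s : List Char) :
    ∀ (L : List Nat) (arr : List Int), BoundsInv arr →
      BoundsInv (L.foldl (fun arr i => maxFixGo s i (i + 1) arr ((i : Int) - 1)) arr) := by
  intro L
  induction L with
  | nil => intro arr h; exact h
  | cons a t ih =>
    intro arr h
    exact ih _ (maxFixGo_bounds s a _ arr _ h (by omega))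

theorem maxFix_bounds (s : List Char) : BoundsInv (maxFix s) :=
  maxFix_fold_bounds s _ _ (boundsInv_replicate _)

theorem maxFix_len (s : List Char) : (maxFix s).length = s.length := by
  unfold maxFix
  generalize List.range' 1 (s.length - 1) = L
  have : ∀ (L : List Nat) (arr : List Int),
      (L.foldl (fun arr i => maxFixGo s i (i + 1) arr ((i : Int) - 1)) arr).length
        = arr.length := by
    intro L
    induction L with
    | nil => intro arr; rfl
    | cons a t ih =>
      intro arr
      rw [List.foldl_cons, ih, maxFixGo_len]
  rw [this, List.length_replicate]

theorem minFixGo_stop (fuel : Nat) (hf : 1 ≤ fuel) (arr : List Int) (i : Nat) (j : Int)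
    (h : arr.getD j.toNat 0 = 0) : minFixGo fuel arr i j = arr := by
  obtain ⟨f, rfl⟩ : ∃ f, fuel = f + 1 := ⟨fuel - 1, by omega⟩
  simp only [minFixGo]
  rw [h]
  simp

-- main invariant relating A's array (prefix = answers, tail = max borders) and B's fresh array
def ArrInv (m : List Int) (n i : Nat) (A B : List Int) : Prop :=
  A.length = n ∧ B.length = n ∧
  (∀ k, k < i → A.getD k 0 = B.getD k 0) ∧
  (∀ k, i ≤ k → A.getD k 0 = m.getD k 0) ∧
  (∀ k, i ≤ k → B.getD k 0 = 0) ∧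
  (∀ k, k < i → 0 ≤ B.getD k 0 ∧ B.getD k 0 ≤ (k : Int) ∧
      (B.getD k 0 = 0 ∨ B.getD ((B.getD k 0 - 1).toNat) 0 = 0))

theorem step_inv (m : List Int) (hm : BoundsInv m) (n i : Nat) (hi1 : 1 ≤ i) (hin : i < n)
    (A B : List Int) (h : ArrInv m n i A B) :
    ArrInv m n (i + 1) (minFixGo (i + 2) A i (i : Int))
      (if m.getD i 0 ≠ 0 then
        B.set i (if B.getD (m.getD i 0 - 1).toNat 0 ≠ 0 then B.getD (m.getD i 0 - 1).toNat 0
                 else m.getD i 0)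
       else B) := by
  obtain ⟨i', rfl⟩ : ∃ i', i = i' + 1 := ⟨i - 1, by omega⟩
  obtain ⟨hA, hB, heq, hAm, hB0, hP⟩ := h
  set i := i' + 1 with hidef
  set p := m.getD i 0 with hp
  have hpb := hm i
  have hAi : A.getD i 0 = p := hAm i (le_refl i)
  have hiA : i < A.length := by omega
  have hiB : i < B.length := by omega
  by_cases hp0 : p = 0
  · -- while loop never runs; B leaves res[i] = 0
    have e : minFixGo (i + 2) A i (i : Int) = A := by
      simp only [minFixGo, Int.toNat_natCast]
      rw [hAi, hp0]
      simp
    rw [e, if_neg (by simpa [hp] using hp0)]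
    refine ⟨hA, hB, ?_, ?_, ?_, ?_⟩
    · intro k hk
      rcases Nat.lt_succ_iff_lt_or_eq.mp hk with hk | rfl
      · exact heq k hk
      · rw [hAi, hp0, hB0 i (le_refl i)]
    · intro k hk; exact hAm k (by omega)
    · intro k hk; exact hB0 k (by omega)
    · intro k hk
      rcases Nat.lt_succ_iff_lt_or_eq.mp hk with hk | rfl
      · exact hP k hk
      · rw [hB0 i (le_refl i)]
        exact ⟨le_refl 0, Int.natCast_nonneg i, Or.inl rfl⟩
  · -- p ≥ 1: the chain from i stops after at most two hops
    have hp1 : 1 ≤ p := by omega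
    have hple : p ≤ (i : Int) := hpb.2
    set t := (p - 1).toNat with ht
    have htc : (t : Int) = p - 1 := by omega
    have hti : t < i := by omega
    set r := B.getD t 0 with hr
    have hAt : A.getD t 0 = r := heq t hti
    have hPt := hP t hti
    by_cases hr0 : r = 0
    · -- one hop: res[i] = p
      have e : minFixGo (i + 2) A i (i : Int) = A.set i p := by
        simp only [minFixGo, Int.toNat_natCast]
        rw [hAi]
        rw [if_pos hp0]
        have e2 : (A.set i p).getD (p - 1).toNat 0 = r := by
          rw [← ht, getD_set_ne _ _ _ _ (by omega), hAt]
        rw [e2, hr0]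
        simp
      rw [e, if_pos (by simpa [hp] using hp0), if_neg (by simp [hr0])]
      refine ⟨by simpa using hA, by simpa using hB, ?_, ?_, ?_, ?_⟩
      · intro k hk
        rcases Nat.lt_succ_iff_lt_or_eq.mp hk with hk | rfl
        · rw [getD_set_ne _ _ _ _ (by omega), getD_set_ne _ _ _ _ (by omega)]
          exact heq k hk
        · rw [getD_set_self _ _ _ hiA, getD_set_self _ _ _ hiB]
      · intro k hk
        rw [getD_set_ne _ _ _ _ (by omega)]
        exact hAm k (by omega)
      · intro k hk
        rw [getD_set_ne _ _ _ _ (by omega)]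
        exact hB0 k (by omega)
      · intro k hk
        rcases Nat.lt_succ_iff_lt_or_eq.mp hk with hk | rfl
        · have hbk := hP k hk
          have hkk : (B.set i p).getD k 0 = B.getD k 0 := getD_set_ne _ _ _ _ (by omega)
          rw [hkk]
          refine ⟨hbk.1, hbk.2.1, ?_⟩
          rcases hbk.2.2 with h0 | h0
          · exact Or.inl h0
          · refine Or.inr ?_
            rw [getD_set_ne _ _ _ _ ?_, h0]
            have : (B.getD k 0 - 1).toNat ≤ k := by
              have := (hP k hk).2.1; omega
            omega
        · rw [getD_set_self _ _ _ hiB]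
          refine ⟨by omega, by omega, Or.inr ?_⟩
          rw [getD_set_ne _ _ _ _ (by omega)]
          exact hr0
    · -- two hops: res[i] = r, and res[r-1] = 0 by minimality of r
      have hr1 : 1 ≤ r := by have := hPt.1; omega
      have hrt : r ≤ (t : Int) := hPt.2.1
      set u := (r - 1).toNat with hu
      have huc : (u : Int) = r - 1 := by omega
      have hut : u < t := by omega
      have hBu : B.getD u 0 = 0 := by
        rcases hPt.2.2 with h0 | h0
        · exact absurd h0 hr0
        · exact h0
      have e : minFixGo (i + 2) A i (i : Int) = A.set i r := by
        simp only [minFixGo, Int.toNat_natCast]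
        rw [hAi]
        rw [if_pos hp0]
        have e2 : (A.set i p).getD (p - 1).toNat 0 = r := by
          rw [← ht, getD_set_ne _ _ _ _ (by omega), hAt]
        rw [e2, if_pos hr0]
        have e3 : ((A.set i p).set i r).getD (r - 1).toNat 0 = 0 := by
          rw [List.set_set, ← hu, getD_set_ne _ _ _ _ (by omega), heq u (by omega), hBu]
        rw [minFixGo_stop i hi1 _ _ _ e3, List.set_set]
      rw [e, if_pos (by simpa [hp] using hp0), if_pos hr0]
      refine ⟨by simpa using hA, by simpa using hB, ?_, ?_, ?_, ?_⟩
      · intro k hk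
        rcases Nat.lt_succ_iff_lt_or_eq.mp hk with hk | rfl
        · rw [getD_set_ne _ _ _ _ (by omega), getD_set_ne _ _ _ _ (by omega)]
          exact heq k hk
        · rw [getD_set_self _ _ _ hiA, getD_set_self _ _ _ hiB]
      · intro k hk
        rw [getD_set_ne _ _ _ _ (by omega)]
        exact hAm k (by omega)
      · intro k hk
        rw [getD_set_ne _ _ _ _ (by omega)]
        exact hB0 k (by omega)
      · intro k hk
        rcases Nat.lt_succ_iff_lt_or_eq.mp hk with hk | rfl
        · have hbk := hP k hk
          have hkk : (B.set i r).getD k 0 = B.getD k 0 := getD_set_ne _ _ _ _ (by omega)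
          rw [hkk]
          refine ⟨hbk.1, hbk.2.1, ?_⟩
          rcases hbk.2.2 with h0 | h0
          · exact Or.inl h0
          · refine Or.inr ?_
            rw [getD_set_ne _ _ _ _ ?_, h0]
            have : (B.getD k 0 - 1).toNat ≤ k := by
              have := (hP k hk).2.1; omega
            omega
        · rw [getD_set_self _ _ _ hiB]
          refine ⟨by omega, by omega, Or.inr ?_⟩
          rw [getD_set_ne _ _ _ _ (by omega)]
          exact hBu

theorem fold_inv (m : List Int) (hm : BoundsInv m) (n : Nat) :
    ∀ (cnt a : Nat) (A B : List Int), 1 ≤ a → a + cnt ≤ n → ArrInv m n a A B →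
      ArrInv m n (a + cnt)
        ((List.range' a cnt).foldl (fun arr i => minFixGo (i + 2) arr i (i : Int)) A)
        ((List.range' a cnt).foldl
          (fun res i =>
            let p := m.getD i 0
            if p ≠ 0 then
              let r := res.getD (p - 1).toNat 0
              res.set i (if r ≠ 0 then r else p)
            else res) B) := by
  intro cnt
  induction cnt with
  | zero => intro a A B _ _ h; simpa using h
  | succ c ih =>
    intro a A B ha hcnt h
    rw [List.range'_succ]
    simp only [List.foldl_cons]
    have := ih (a + 1) _ _ (by omega) (by omega)
      (step_inv m hm n a ha (by omega) A B h)
    have harith : a + 1 + c = a + (c + 1) := by omega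
    rwa [harith] at this

theorem getD_eq_final (A B : List Int) (n : Nat) (hA : A.length = n) (hB : B.length = n)
    (h : ∀ k, k < n → A.getD k 0 = B.getD k 0) : A = B := by
  apply List.ext_getElem (by omega)
  intro k hk1 hk2
  have := h k (by omega)
  rwa [List.getD_eq_getElem A 0 hk1, List.getD_eq_getElem B 0 hk2] at this

-- ===== VERDICT (by name: the statement is the Claim_ definition above) =====
theorem min_fix_spec : Claim_equal_min_fix := by
  intro s _
  show min_fix s = min_fix_alt s
  simp only [min_fix, min_fix_alt]
  set l := s.toList with hl
  set n := l.length with hn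
  set m := maxFix l with hmdef
  rcases Nat.eq_zero_or_pos n with h0 | hpos
  · have hm0 : m = [] := List.eq_nil_of_length_eq_zero (by rw [maxFix_len]; omega)
    rw [h0]
    simpa using hm0
  · have hinit : ArrInv m n 1 m (List.replicate n 0) := by
      refine ⟨maxFix_len l, List.length_replicate, ?_, fun k _ => rfl,
        fun k _ => getD_replicate n k, ?_⟩
      · intro k hk
        interval_cases k
        have hb := maxFix_bounds l 0
        rw [← hmdef] at hb
        rw [getD_replicate]
        omega
      · intro k hk
        interval_cases k
        rw [getD_replicate]
        exact ⟨le_refl 0, le_refl 0, Or.inl rfl⟩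
    have hfin := fold_inv m (maxFix_bounds l) n (n - 1) 1 m (List.replicate n 0)
      (le_refl 1) (by omega) hinit
    have hnn : 1 + (n - 1) = n := by omega
    rw [hnn] at hfin
    obtain ⟨hA, hB, heq, _, _, _⟩ := hfin
    exact getD_eq_final _ _ n hA hB heq
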